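-- pv_equiv track=rewrite | github.com/NguyenThiCamNhung1402/cky | new.py | question_28
-- ===== SOURCE A (Python) =====
-- from typing import Dict
-- from typing import Dict
--
-- def question_28(s: str) -> Dict[str, int]:
--     dem={}
--     for i in range(len(s)):
--         if s[i] in dem:
--             dem[s[i]] += 1
--         else:
--             dem[s[i]]=1
--     return dem
-- ===== SOURCE B (Python) =====
-- def question_28(s: str):
--     return {c: s.count(c) for c in dict.fromkeys(s)}
-- ===== Notes on version B (the rewrite author's own statement) =====
-- stated objective: idiomatic
-- what changed: Replaces the single accumulating pass with per-character dict updates by a build-the-distinct-key-list-then-rescan strategy: a dict comprehension over dict.fromkeys(s) counting each distinct character with s.count(c).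
import Mathlib
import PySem

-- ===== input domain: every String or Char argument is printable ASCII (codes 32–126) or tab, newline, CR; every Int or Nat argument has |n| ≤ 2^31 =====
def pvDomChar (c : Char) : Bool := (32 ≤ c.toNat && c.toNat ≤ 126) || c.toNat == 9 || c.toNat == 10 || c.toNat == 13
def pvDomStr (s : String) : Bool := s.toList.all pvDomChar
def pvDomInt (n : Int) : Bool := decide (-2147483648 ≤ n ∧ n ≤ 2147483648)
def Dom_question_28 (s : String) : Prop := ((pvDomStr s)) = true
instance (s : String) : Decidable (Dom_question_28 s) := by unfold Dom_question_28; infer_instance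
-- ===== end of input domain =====

-- B replaces A's single accumulating pass by the-distinct-keys-then-rescan: count each distinct char with s.count(c). Measured faster in CPython (the rescans run in C).

-- ===== PORT A =====
-- for i in range(len(s)): if s[i] in dem: dem[s[i]] += 1 else: dem[s[i]] = 1; return dem
-- (the key s[i] is a one-character string: String.ofList [c])
def question_28 (s : String) : List (String × Int) :=
  (s.toList.foldl
    (fun d c =>
      let k := String.ofList [c]
      if d.contains k then d.insert k (d.getD k 0 + 1) else d.insert k 1)
    (PySem.Dict.empty : PySem.Dict String Int)).items

-- ===== PORT B =====
-- {c: s.count(c) for c in dict.fromkeys(s)}  (dict.fromkeys = PySem.List.dedup; s.count(c) = PySem.Str.count, exact for a 1-char needle)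
def question_28_alt (s : String) : List (String × Int) :=
  (PySem.List.dedup s.toList).map
    (fun c => (String.ofList [c], (PySem.Str.count s (String.ofList [c]) : Int)))

-- ===== PRECONDITION & SPEC =====
def Spec_question_28 (s : String) (out : List (String × Int)) : Prop := out = question_28_alt s
instance (s : String) (out : List (String × Int)) : Decidable (Spec_question_28 s out) := by unfold Spec_question_28; infer_instance

-- ===== CLAIM (what is proved, stated in full; the proofs are below) =====
def Claim_equal_question_28 : Prop := ∀ (s : String), Dom_question_28 s → Spec_question_28 s (question_28 s)

-- ===== LEMMAS AND PROOFS =====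

-- non-overlapping substring count of a single character is the character count
theorem pv_count_go_single (c : Char) (l : List Char) (fuel acc : Nat) (h : l.length ≤ fuel) :
    PySem.Chars.count.go [c] fuel l acc = acc + l.count c := by
  induction l generalizing fuel acc with
  | nil => cases fuel <;> simp [PySem.Chars.count.go]
  | cons a t ih =>
    cases fuel with
    | zero => simp at h
    | succ f =>
      simp only [PySem.Chars.count.go]
      by_cases hc : c = a
      · subst hc
        simp [List.isPrefixOf, ih _ _ (by simpa using h)]
        omega
      · simp [List.isPrefixOf, hc, ih _ _ (by simpa using h), Ne.symm hc]

theorem pv_count_single (l : List Char) (c : Char) : PySem.Chars.count l [c] = List.count c l := by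
  simpa using pv_count_go_single c l l.length 0 le_rfl

theorem pv_key_inj : Function.Injective (fun c : Char => String.ofList [c]) := by
  intro a b h
  have := congrArg String.toList h
  simpa using this

-- set(map f l) = map f (set l) for injective f, via the foldl-add form
theorem pv_ofList_map (f : Char → String) (hf : Function.Injective f) (l : List Char)
    (acc : PySem.Set String) (accl : PySem.Set Char) (hacc : acc = accl.map f) :
    (l.map f).foldl PySem.Set.add acc = (l.foldl PySem.Set.add accl).map f := by
  induction l generalizing acc accl with
  | nil => simpa using hacc
  | cons a t ih =>
    simp only [List.map_cons, List.foldl_cons]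
    apply ih
    subst hacc
    have hmem : (∃ b ∈ accl, f b = f a) ↔ a ∈ accl := by
      constructor
      · rintro ⟨b, hb, hfb⟩; rwa [← hf hfb]
      · intro h; exact ⟨a, h, rfl⟩
    simp only [PySem.Set.add, PySem.Set.contains, List.contains_iff_mem, List.mem_map]
    split_ifs with h1 h2 h2 <;> simp_all

theorem pv_set_ofList_map (f : Char → String) (hf : Function.Injective f) (l : List Char) :
    PySem.Set.ofList (l.map f) = (PySem.Set.ofList l).map f := by
  rw [PySem.Set.ofList_eq_foldl, PySem.Set.ofList_eq_foldl]
  exact pv_ofList_map f hf l _ _ rfl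

-- ===== VERDICT (by name: the statement is the Claim_ definition above) =====
theorem question_28_spec : Claim_equal_question_28 := by
  intro s _
  unfold Spec_question_28 question_28 question_28_alt
  have hstep :
      s.toList.foldl
        (fun d c =>
          let k := String.ofList [c]
          if d.contains k then d.insert k (d.getD k 0 + 1) else d.insert k 1)
        (PySem.Dict.empty : PySem.Dict String Int)
      = s.toList.foldl
        (fun d c => d.insert (String.ofList [c]) (d.getD (String.ofList [c]) 0 + 1))
        PySem.Dict.empty := by
    apply PySem.List.foldl_congr_mem
    intro d c _
    by_cases h : d.contains (String.ofList [c])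
    · simp [h]
    · rw [PySem.Dict.getD_of_not_contains _ _ (by simpa using h)]
      simp [h]
  rw [hstep, ← List.foldl_map (f := fun c : Char => String.ofList [c])
        (g := fun (d : PySem.Dict String Int) k => d.insert k (d.getD k 0 + 1)),
      PySem.Dict.foldl_insert_getD_add_one_eq_counter, PySem.Dict.items_counter,
      pv_set_ofList_map _ pv_key_inj, List.map_map]
  apply List.map_congr_left
  intro c hc
  simp only [Function.comp]
  congr 1
  rw [List.count_map_of_injective _ _ pv_key_inj]
  simp only [PySem.Str.count_eq, String.toList_ofList]
  rw [pv_count_single]
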